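-- pv_equiv track=rewrite | github.com/k-monitor/sajtoadatbazis-automat | webapp/auto_kmdb/db.py | group_dicts_by_name
-- ===== SOURCE A (Python) =====
-- def group_dicts_by_name(dict_list):
--     groups = []
--     visited = set()  # To keep track of the processed dictionaries
--     for i, dict_i in enumerate(dict_list):
--         if i in visited:
--             continue  # Skip if this dictionary has already been grouped
--         current_group = [dict_i]
--         visited.add(i)
--         for j, dict_j in enumerate(dict_list):
--             if j in visited:
--                 continue
--             # Check if either name is a substring of the other
--             if dict_i["name"] in dict_j["name"] or dict_j["name"] in dict_i["name"]:
--                 current_group.append(dict_j)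
--                 visited.add(j)
--         groups.append(current_group)
--     return groups
-- ===== SOURCE B (Python) =====
-- def group_dicts_by_name(dict_list):
--     groups = []
--     remaining = list(dict_list)
--     while remaining:
--         rep = remaining[0]
--         group = [rep]
--         new_remaining = []
--         for d in remaining[1:]:
--             if rep["name"] in d["name"] or d["name"] in rep["name"]:
--                 group.append(d)
--             else:
--                 new_remaining.append(d)
--         groups.append(group)
--         remaining = new_remaining
--     return groups
-- ===== Notes on version B (the rewrite author's own statement) =====
-- stated objective: simpler
-- what changed: Replaced the index/visited-set bookkeeping with double full-list rescans by a shrinking worklist that is partitioned around the first remaining element each round, so no indices or visited set exist at all.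
import Mathlib
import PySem

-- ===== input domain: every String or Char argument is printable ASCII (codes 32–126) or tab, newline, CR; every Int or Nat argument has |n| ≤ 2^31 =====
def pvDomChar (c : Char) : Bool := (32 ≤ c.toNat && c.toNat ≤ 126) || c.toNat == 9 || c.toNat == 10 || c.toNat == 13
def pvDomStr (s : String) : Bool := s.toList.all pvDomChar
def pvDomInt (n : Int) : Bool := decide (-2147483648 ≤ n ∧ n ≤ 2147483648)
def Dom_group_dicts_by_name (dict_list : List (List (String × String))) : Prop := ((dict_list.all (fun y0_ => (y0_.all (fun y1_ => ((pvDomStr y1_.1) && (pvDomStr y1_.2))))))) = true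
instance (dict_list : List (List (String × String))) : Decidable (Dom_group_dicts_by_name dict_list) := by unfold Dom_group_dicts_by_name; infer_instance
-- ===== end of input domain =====

-- B replaces A's index/visited-set bookkeeping with full-list rescans by a shrinking
-- worklist partitioned around its first element each round (objective: simpler).


-- ===== PORT A =====
-- d["name"] (exact on Pre_, where the key is present; Python raises KeyError when absent)
def pvName (d : List (String × String)) : String :=
  ((PySem.Dict.mk d).get? "name").getD ""

-- dict_i["name"] in dict_j["name"] or dict_j["name"] in dict_i["name"]
def pvMatch (a b : List (String × String)) : Bool :=
  PySem.Str.isIn (pvName a) (pvName b) || PySem.Str.isIn (pvName b) (pvName a)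

-- body of A's inner 'for j, dict_j in enumerate(dict_list)' loop; state = (current_group, visited)
def pvInnerF (rep : List (String × String))
    (st : List (List (String × String)) × PySem.Set Int) (q : Int × List (String × String)) :
    List (List (String × String)) × PySem.Set Int :=
  if PySem.Set.contains st.2 q.1 then st
  else if pvMatch rep q.2 then (st.1 ++ [q.2], PySem.Set.add st.2 q.1) else st

-- body of A's outer 'for i, dict_i in enumerate(dict_list)' loop; state = (groups, visited)
def pvOuterF (L : List (Int × List (String × String)))
    (st : List (List (List (String × String))) × PySem.Set Int)
    (p : Int × List (String × String)) :
    List (List (List (String × String))) × PySem.Set Int :=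
  if PySem.Set.contains st.2 p.1 then st
  else
    let inner := L.foldl (pvInnerF p.2) ([p.2], PySem.Set.add st.2 p.1)
    (st.1 ++ [inner.1], inner.2)

def group_dicts_by_name (dict_list : List (List (String × String))) : List (List (List (String × String))) :=
  ((PySem.List.enumerate dict_list).foldl (pvOuterF (PySem.List.enumerate dict_list))
    ([], PySem.Set.empty)).1

-- ===== PORT B =====
-- the inner 'for d in remaining[1:]' loop: (group-tail, new_remaining) built by appends
def pvSplit (rep : List (String × String)) (xs : List (List (String × String))) :
    List (List (String × String)) × List (List (String × String)) :=
  xs.foldl (fun st d => if pvMatch rep d then (st.1 ++ [d], st.2) else (st.1, st.2 ++ [d])) ([], [])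

theorem pvSplit_snd_length_le (rep : List (String × String)) (xs : List (List (String × String))) :
    (pvSplit rep xs).2.length ≤ xs.length := by
  suffices h : ∀ (xs : List (List (String × String)))
      (st : List (List (String × String)) × List (List (String × String))),
      (xs.foldl (fun st d => if pvMatch rep d then (st.1 ++ [d], st.2) else (st.1, st.2 ++ [d])) st).2.length
        ≤ st.2.length + xs.length by
    simpa [pvSplit] using h xs ([], [])
  intro xs
  induction xs with
  | nil => simp
  | cons d xs ih =>
    intro st
    simp only [List.foldl_cons]
    split
    · exact le_trans (ih _) (by simp)
    · exact le_trans (ih _) (by simp; omega)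

-- the 'while remaining:' loop
def pvLoop : List (List (String × String)) → List (List (List (String × String)))
  | [] => []
  | rep :: rest =>
    (rep :: (pvSplit rep rest).1) :: pvLoop (pvSplit rep rest).2
termination_by xs => xs.length
decreasing_by
  have := pvSplit_snd_length_le rep rest
  simp only [List.length_cons]; omega

def group_dicts_by_name_alt (dict_list : List (List (String × String))) : List (List (List (String × String))) :=
  pvLoop dict_list

-- ===== PRECONDITION & SPEC =====
-- Pre_ excludes exactly the inputs where the Python raises KeyError: a list of ≥ 2 dicts in
-- which some dict lacks the key "name" (with 0 or 1 dicts no name is ever looked up and A returns).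
def Pre_group_dicts_by_name (dict_list : List (List (String × String))) : Prop :=
  dict_list.length ≤ 1 ∨ ∀ d ∈ dict_list, ((PySem.Dict.mk d).get? "name").isSome
instance (dict_list : List (List (String × String))) : Decidable (Pre_group_dicts_by_name dict_list) := by
  unfold Pre_group_dicts_by_name; infer_instance

def pvWitness_group_dicts_by_name : (List (List (String × String))) :=
  [[("name", "ab")], [("name", "b"), ("id", "1")], [("name", "xy")]]

def Spec_group_dicts_by_name (dict_list : List (List (String × String))) (out : List (List (List (String × String)))) : Prop := out = group_dicts_by_name_alt dict_list
instance (dict_list : List (List (String × String))) (out : List (List (List (String × String)))) : Decidable (Spec_group_dicts_by_name dict_list out) := by unfold Spec_group_dicts_by_name; infer_instance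

-- ===== CLAIM (what is proved, stated in full; the proofs are below) =====
def Claim_equal_group_dicts_by_name : Prop := ∀ (dict_list : List (List (String × String))), Dom_group_dicts_by_name dict_list → Pre_group_dicts_by_name dict_list → Spec_group_dicts_by_name dict_list (group_dicts_by_name dict_list)

-- ===== LEMMAS AND PROOFS =====
theorem pvSplit_eq_filter (rep : List (String × String)) (xs : List (List (String × String))) :
    pvSplit rep xs = (xs.filter (fun d => pvMatch rep d), xs.filter (fun d => !pvMatch rep d)) := by
  suffices h : ∀ (xs : List (List (String × String))) (a b : List (List (String × String))),
      (xs.foldl (fun st d => if pvMatch rep d then (st.1 ++ [d], st.2) else (st.1, st.2 ++ [d])) (a, b))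
        = (a ++ xs.filter (fun d => pvMatch rep d), b ++ xs.filter (fun d => !pvMatch rep d)) by
    simpa [pvSplit] using h xs [] []
  intro xs
  induction xs with
  | nil => simp
  | cons d xs ih =>
    intro a b
    by_cases h : pvMatch rep d = true <;> simp [h, ih]

-- skipping a block of already-visited indexed elements leaves the inner state unchanged
theorem pvInner_skip (rep : List (String × String)) (P : List (Int × List (String × String)))
    (st : List (List (String × String)) × PySem.Set Int)
    (h : ∀ q ∈ P, PySem.Set.contains st.2 q.1 = true) :
    P.foldl (pvInnerF rep) st = st := by
  induction P with
  | nil => rfl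
  | cons q P ih =>
    simp only [List.foldl_cons, pvInnerF, h q (by simp)]
    exact ih (fun r hr => h r (by simp [hr]))

-- the inner loop over a strictly index-increasing block appends exactly the unvisited matches
theorem pvInner_eq (rep : List (String × String)) (S : List (Int × List (String × String)))
    (hp : S.Pairwise (fun p q => p.1 < q.1)) (g : List (List (String × String))) (V : PySem.Set Int) :
    S.foldl (pvInnerF rep) (g, V) =
      (g ++ (S.filter (fun q => !PySem.Set.contains V q.1 && pvMatch rep q.2)).map (·.2),
       PySem.Set.update V ((S.filter (fun q => !PySem.Set.contains V q.1 && pvMatch rep q.2)).map (·.1))) := by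
  induction S generalizing g V with
  | nil => simp [PySem.Set.update]
  | cons q S ih =>
    have hlt : ∀ r ∈ S, q.1 < r.1 := (List.pairwise_cons.mp hp).1
    have hp' : S.Pairwise (fun p q => p.1 < q.1) := (List.pairwise_cons.mp hp).2
    by_cases hv : PySem.Set.contains V q.1 = true
    · have hb : (!PySem.Set.contains V q.1 && pvMatch rep q.2) = false := by rw [hv]; rfl
      rw [List.foldl_cons, show pvInnerF rep (g, V) q = (g, V) by simp only [pvInnerF, hv, if_true], ih hp']
      simp only [List.filter_cons, hb, Bool.false_eq_true, if_false]
    · have hcongr : ∀ r ∈ S,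
          (!PySem.Set.contains (PySem.Set.add V q.1) r.1 && pvMatch rep r.2)
            = (!PySem.Set.contains V r.1 && pvMatch rep r.2) := by
        intro r hr
        have hne : r.1 ≠ q.1 := by have := hlt r hr; omega
        simp [PySem.Set.contains_eq_listContains, PySem.Set.mem_add, hne]
      by_cases hm : pvMatch rep q.2 = true
      · have hb : (!PySem.Set.contains V q.1 && pvMatch rep q.2) = true := by
          rw [eq_false_of_ne_true hv, hm]; rfl
        rw [List.foldl_cons,
          show pvInnerF rep (g, V) q = (g ++ [q.2], PySem.Set.add V q.1) by simp only [pvInnerF, eq_false_of_ne_true hv, Bool.false_eq_true, if_false, hm, if_true],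
          ih hp', List.filter_congr hcongr]
        simp only [List.filter_cons, hb, if_true, List.map_cons]
        simp [PySem.Set.update]
      · have hb : (!PySem.Set.contains V q.1 && pvMatch rep q.2) = false := by
          rw [eq_false_of_ne_true hm]; simp
        rw [List.foldl_cons, show pvInnerF rep (g, V) q = (g, V) by simp only [pvInnerF, eq_false_of_ne_true hv, eq_false_of_ne_true hm, Bool.false_eq_true, if_false], ih hp']
        simp only [List.filter_cons, hb, Bool.false_eq_true, if_false]

-- filtering after projecting to the dicts = projecting after filtering the indexed pairs
theorem pvFilterMapFilter (f : Int × List (String × String) → Bool)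
    (g : List (String × String) → Bool) (S : List (Int × List (String × String))) :
    ((S.filter f).map (·.2)).filter g = (S.filter (fun q => f q && g q.2)).map (·.2) := by
  induction S with
  | nil => rfl
  | cons q S ih => by_cases hf : f q = true <;> by_cases hg : g q.2 = true <;> simp [hf, hg, ih]

-- the outer loop, starting after an already-visited prefix P, produces exactly pvLoop of the
-- still-unvisited elements in order
theorem pvOuter_eq (L : List (Int × List (String × String)))
    (hL : L.Pairwise (fun p q => p.1 < q.1)) :
    ∀ (S P : List (Int × List (String × String))) (V : PySem.Set Int)
      (groups : List (List (List (String × String)))),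
      L = P ++ S → (∀ q ∈ P, PySem.Set.contains V q.1 = true) →
      (S.foldl (pvOuterF L) (groups, V)).1
        = groups ++ pvLoop ((S.filter (fun q => !PySem.Set.contains V q.1)).map (·.2)) := by
  intro S
  induction S with
  | nil => intro P V groups _ _; simp [pvLoop]
  | cons p S ih =>
    intro P V groups hEq h
    have hpS : (p :: S).Pairwise (fun a b => a.1 < b.1) :=
      hL.sublist (by rw [hEq]; exact List.sublist_append_right P (p :: S))
    have hlt : ∀ r ∈ S, p.1 < r.1 := (List.pairwise_cons.mp hpS).1
    have hp' : S.Pairwise (fun a b => a.1 < b.1) := (List.pairwise_cons.mp hpS).2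
    by_cases hv : PySem.Set.contains V p.1 = true
    · have hb : (!PySem.Set.contains V p.1) = false := by rw [hv]; rfl
      rw [List.foldl_cons, show pvOuterF L (groups, V) p = (groups, V) by
          simp only [pvOuterF, hv, if_true],
        ih (P ++ [p]) V groups (by rw [hEq, List.append_assoc]; rfl)
          (by intro q hq; rcases List.mem_append.mp hq with h1 | h1
              · exact h q h1
              · simp only [List.mem_singleton] at h1; rw [h1]; exact hv)]
      simp only [List.filter_cons, hb, Bool.false_eq_true, if_false]
    · -- an unvisited representative: run the inner scan
      -- the inner scan over L = P ++ p :: S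
      have hPskip : ∀ q ∈ P, PySem.Set.contains (PySem.Set.add V p.1) q.1 = true := by
        intro q hq
        have : q.1 ∈ V := by
          have := h q hq; simpa [PySem.Set.contains_eq_listContains] using this
        simp [PySem.Set.contains_eq_listContains, PySem.Set.mem_add, this]
      have hcongr : ∀ r ∈ S,
          (!PySem.Set.contains (PySem.Set.add V p.1) r.1 && pvMatch p.2 r.2)
            = (!PySem.Set.contains V r.1 && pvMatch p.2 r.2) := by
        intro r hr
        have hne : r.1 ≠ p.1 := by have := hlt r hr; omega
        simp [PySem.Set.contains_eq_listContains, PySem.Set.mem_add, hne]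
      have hinner : L.foldl (pvInnerF p.2) ([p.2], PySem.Set.add V p.1)
          = ([p.2] ++ (S.filter (fun q => !PySem.Set.contains V q.1 && pvMatch p.2 q.2)).map (·.2),
             PySem.Set.update (PySem.Set.add V p.1)
               ((S.filter (fun q => !PySem.Set.contains V q.1 && pvMatch p.2 q.2)).map (·.1))) := by
        rw [hEq, List.foldl_append, pvInner_skip p.2 P _ hPskip, List.foldl_cons,
          show pvInnerF p.2 ([p.2], PySem.Set.add V p.1) p = ([p.2], PySem.Set.add V p.1) by
            simp only [pvInnerF]
            rw [if_pos (by simp [PySem.Set.contains_eq_listContains, PySem.Set.mem_add])],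
          pvInner_eq p.2 S hp', List.filter_congr hcongr]
      set matched := S.filter (fun q => !PySem.Set.contains V q.1 && pvMatch p.2 q.2) with hmdef
      set V' := PySem.Set.update (PySem.Set.add V p.1) (matched.map (·.1)) with hV'def
      have hmemV' : ∀ x : Int, x ∈ V' ↔ x ∈ V ∨ x = p.1 ∨ x ∈ matched.map (·.1) := by
        intro x
        rw [hV'def]
        simp [PySem.Set.mem_update, PySem.Set.mem_add]
        tauto
      have hfstinj : ∀ a ∈ S, ∀ b ∈ S, a.1 = b.1 → a = b := by
        apply List.inj_on_of_nodup_map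
        exact (List.pairwise_map.mpr (hp'.imp (by intro a b hab; exact ne_of_lt hab)))
      have hcongr2 : ∀ q ∈ S,
          (!PySem.Set.contains V' q.1)
            = (!PySem.Set.contains V q.1 && !pvMatch p.2 q.2) := by
        intro q hq
        have hne : q.1 ≠ p.1 := by have := hlt q hq; omega
        have hmm : q.1 ∈ matched.map (·.1) ↔ (q.1 ∉ V ∧ pvMatch p.2 q.2 = true) := by
          constructor
          · intro hx
            rcases List.mem_map.mp hx with ⟨q', hq', hfst⟩
            have hq'S : q' ∈ S := List.mem_of_mem_filter hq'
            have : q' = q := hfstinj q' hq'S q hq hfst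
            subst this
            have := List.of_mem_filter hq'
            simpa [PySem.Set.contains_eq_listContains] using this
          · intro ⟨h1, h2⟩
            exact List.mem_map.mpr ⟨q, List.mem_filter.mpr ⟨hq,
              by simp [PySem.Set.contains_eq_listContains, h1, h2]⟩, rfl⟩
        by_cases h1 : q.1 ∈ V
        · have : PySem.Set.contains V' q.1 = true := by
            simp [PySem.Set.contains_eq_listContains, (hmemV' q.1).mpr (Or.inl h1)]
          rw [this]; simp [PySem.Set.contains_eq_listContains, h1]
        · by_cases h2 : pvMatch p.2 q.2 = true
          · have : PySem.Set.contains V' q.1 = true := by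
              simp [PySem.Set.contains_eq_listContains,
                (hmemV' q.1).mpr (Or.inr (Or.inr (hmm.mpr ⟨h1, h2⟩)))]
            rw [this]; simp [h2]
          · have : PySem.Set.contains V' q.1 = false := by
              simp only [PySem.Set.contains_eq_listContains, List.contains_eq_mem,
                decide_eq_false_iff_not]
              rw [hmemV']
              push Not
              exact ⟨h1, hne, fun hx => absurd (hmm.mp hx).2 h2⟩
            rw [this]
            simp [PySem.Set.contains_eq_listContains, h1, eq_false_of_ne_true h2]
      rw [List.foldl_cons, show pvOuterF L (groups, V) p
            = (groups ++ [p.2 :: matched.map (·.2)], V') by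
          simp only [pvOuterF, hv, Bool.false_eq_true, if_false, hinner]
          simp,
        ih (P ++ [p]) V' (groups ++ [p.2 :: matched.map (·.2)])
          (by rw [hEq, List.append_assoc]; rfl)
          (by intro q hq; rcases List.mem_append.mp hq with h1 | h1
              · have : q.1 ∈ V := by
                  have := h q h1; simpa [PySem.Set.contains_eq_listContains] using this
                simp [PySem.Set.contains_eq_listContains, (hmemV' q.1).mpr (Or.inl this)]
              · simp only [List.mem_singleton] at h1; rw [h1]
                simp [PySem.Set.contains_eq_listContains, (hmemV' p.1).mpr (Or.inr (Or.inl rfl))])]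
      -- now relate the B side
      have hbp : (!PySem.Set.contains V p.1) = true := by rw [eq_false_of_ne_true hv]; rfl
      rw [List.filter_cons, if_pos hbp, List.map_cons]
      have hloop : pvLoop (p.2 :: (S.filter (fun q => !PySem.Set.contains V q.1)).map (·.2))
          = (p.2 :: matched.map (·.2))
            :: pvLoop ((S.filter (fun q => !PySem.Set.contains V' q.1)).map (·.2)) := by
        rw [pvLoop, pvSplit_eq_filter]
        have e1 : ((S.filter (fun q => !PySem.Set.contains V q.1)).map (·.2)).filter
              (fun d => pvMatch p.2 d) = matched.map (·.2) := by
          rw [pvFilterMapFilter, hmdef]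
        have e2 : ((S.filter (fun q => !PySem.Set.contains V q.1)).map (·.2)).filter
              (fun d => !pvMatch p.2 d)
            = (S.filter (fun q => !PySem.Set.contains V' q.1)).map (·.2) := by
          rw [pvFilterMapFilter, List.filter_congr hcongr2]
        rw [e1, e2]
      rw [hloop]
      simp
  
-- ===== VERDICT (by name: the statement is the Claim_ definition above) =====
theorem group_dicts_by_name_spec : Claim_equal_group_dicts_by_name := by
  intro dict_list _ _
  unfold Spec_group_dicts_by_name group_dicts_by_name group_dicts_by_name_alt
  rw [pvOuter_eq (PySem.List.enumerate dict_list)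
    (PySem.List.pairwise_lt_enumerate dict_list 0)
    (PySem.List.enumerate dict_list) [] PySem.Set.empty [] (by simp) (by simp)]
  have : ∀ q ∈ PySem.List.enumerate dict_list,
      (!PySem.Set.contains PySem.Set.empty q.1) = true := by
    intro q _
    simp [PySem.Set.contains_eq_listContains, PySem.Set.empty]
  rw [List.filter_eq_self.mpr this, PySem.List.map_snd_enumerate]
  simp
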